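-- pv_equiv track=rewrite | github.com/weka/memsleuth | memsleuth.py | hugepage_availability_safe
-- ===== SOURCE A (Python) =====
-- from typing import Any, Dict, List, Optional, Pattern, Tuple, Union
--
-- MOVABLE_MTYPES = {"Movable", "Reclaimable", "CMA"}
--
-- def hugepage_availability_safe(
--     pagetype: Dict[int, Dict[str, Dict[str, List[int]]]],
--     hugepage_order: int,
-- ) -> Dict[int, int]:
--     """Per-node count from movable-ish (Movable/Reclaimable/CMA) pools
--     only — pages that can be allocated without relocating kernel data.
--     Returns {} when pagetypeinfo wasn't readable (needs root)."""
--     result: Dict[int, int] = {}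
--     for node, zones in pagetype.items():
--         total = 0
--         for per_mtype in zones.values():
--             for mtype, counts in per_mtype.items():
--                 if mtype not in MOVABLE_MTYPES or hugepage_order >= len(counts):
--                     continue
--                 for order in range(hugepage_order, len(counts)):
--                     total += counts[order] * (1 << (order - hugepage_order))
--         result[node] = total
--     return result
-- ===== SOURCE B (Python) =====
-- from typing import Dict, List
--
-- MOVABLE_MTYPES = {"Movable", "Reclaimable", "CMA"}
--
-- def hugepage_availability_safe(
--     pagetype: Dict[int, Dict[str, Dict[str, List[int]]]],
--     hugepage_order: int,
-- ) -> Dict[int, int]: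
--     def pool(counts):
--         # Horner top-down: weighted sum without explicit power-of-two weights
--         acc = 0
--         for order in range(len(counts) - 1, hugepage_order - 1, -1):
--             acc = acc * 2 + counts[order]
--         return acc
--
--     return {
--         node: sum(
--             pool(counts)
--             for per_mtype in zones.values()
--             for mtype, counts in per_mtype.items()
--             if mtype in MOVABLE_MTYPES and hugepage_order < len(counts)
--         )
--         for node, zones in pagetype.items()
--     }
-- ===== Notes on version B (the rewrite author's own statement) =====
-- stated objective: alternative
-- what changed: B replaces A's imperative accumulator loops with a dict comprehension whose per-node value is a sum over a flattened filtered stream of (mtype, counts) pairs, and computes each pool's weighted sum by a top-down Horner accumulator (acc = acc*2 + counts[order]) instead of A's ascending loop with explicit 1 << (order - hugepage_order) weights.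
-- outside the precondition, e.g. on hugepage_availability_safe({0: {'DMA': {'Movable': [1]}}}, -5): A raises IndexError, B raises IndexError
import Mathlib
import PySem

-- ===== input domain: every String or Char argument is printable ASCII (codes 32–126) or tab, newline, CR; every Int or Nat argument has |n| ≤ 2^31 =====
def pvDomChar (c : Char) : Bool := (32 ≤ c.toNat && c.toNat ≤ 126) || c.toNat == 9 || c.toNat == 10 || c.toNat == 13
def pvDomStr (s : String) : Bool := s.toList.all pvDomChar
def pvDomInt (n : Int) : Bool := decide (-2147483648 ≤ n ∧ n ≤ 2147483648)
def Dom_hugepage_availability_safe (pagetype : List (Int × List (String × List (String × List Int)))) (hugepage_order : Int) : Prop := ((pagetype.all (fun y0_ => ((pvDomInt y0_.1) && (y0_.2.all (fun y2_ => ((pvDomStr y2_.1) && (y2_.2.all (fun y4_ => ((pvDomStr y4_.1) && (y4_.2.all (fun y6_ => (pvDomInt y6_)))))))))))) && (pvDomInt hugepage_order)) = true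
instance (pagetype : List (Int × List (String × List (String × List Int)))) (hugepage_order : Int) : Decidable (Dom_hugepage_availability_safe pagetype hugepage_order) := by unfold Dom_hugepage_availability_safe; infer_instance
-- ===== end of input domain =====

-- B rebuilds the result as a dict comprehension over a flattened, filtered stream of
-- (mtype, counts) pairs, summing per-pool Horner accumulators; objective: alternative
-- decomposition, same cost.

-- ===== PORT A =====
-- MOVABLE_MTYPES = {"Movable", "Reclaimable", "CMA"}
def MOVABLE_MTYPES : PySem.Set String := PySem.Set.ofList ["Movable", "Reclaimable", "CMA"]

-- body of A's 'for mtype, counts in per_mtype.items():' loop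
def pvA_mtype (hugepage_order : Int) (total : Int) (mc : String × List Int) : Int :=
  -- if mtype not in MOVABLE_MTYPES or hugepage_order >= len(counts): continue
  if ¬ (PySem.Set.contains MOVABLE_MTYPES mc.1 = true) ∨ (mc.2.length : Int) ≤ hugepage_order then
    total
  else
    -- for order in range(hugepage_order, len(counts)): total += counts[order] * (1 << (order - hugepage_order))
    (PySem.List.pyRange hugepage_order (mc.2.length : Int) 1).foldl
      (fun total order =>
        total + PySem.List.pyGetD mc.2 order 0 * ((1 : Int) <<< (order - hugepage_order).toNat))
      total

-- body of A's 'for per_mtype in zones.values():' loop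
def pvA_zone (hugepage_order : Int) (total : Int) (per_mtype : List (String × List Int)) : Int :=
  ((PySem.Dict.ofList per_mtype).items).foldl (pvA_mtype hugepage_order) total

-- body of A's 'for node, zones in pagetype.items():' loop (total = 0; …; result[node] = total)
def pvA_node (hugepage_order : Int) (result : PySem.Dict Int Int)
    (nz : Int × List (String × List (String × List Int))) : PySem.Dict Int Int :=
  PySem.Dict.insert result nz.1 (((PySem.Dict.ofList nz.2).values).foldl (pvA_zone hugepage_order) 0)

def hugepage_availability_safe (pagetype : List (Int × List (String × List (String × List Int)))) (hugepage_order : Int) : List (Int × Int) :=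
  (((PySem.Dict.ofList pagetype).items).foldl (pvA_node hugepage_order) PySem.Dict.empty).items

-- ===== PORT B =====
-- def pool(counts): acc = 0; for order in range(len(counts)-1, hugepage_order-1, -1): acc = acc*2 + counts[order]; return acc
def pvPool (hugepage_order : Int) (counts : List Int) : Int :=
  (PySem.List.pyRange ((counts.length : Int) - 1) (hugepage_order - 1) (-1)).foldl
    (fun acc order => acc * 2 + PySem.List.pyGetD counts order 0) 0

-- the generator's stream: (mtype, counts) pairs over all zones, kept when movable and long enough
def pvStream (hugepage_order : Int) (zones : List (String × List (String × List Int))) :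
    List (String × List Int) :=
  (((PySem.Dict.ofList zones).values).flatMap
      (fun per_mtype => (PySem.Dict.ofList per_mtype).items)).filter
    (fun mc => PySem.Set.contains MOVABLE_MTYPES mc.1 && decide (hugepage_order < (mc.2.length : Int)))

-- {node: sum(pool(counts) for …) for node, zones in pagetype.items()}
def hugepage_availability_safe_alt (pagetype : List (Int × List (String × List (String × List Int)))) (hugepage_order : Int) : List (Int × Int) :=
  (PySem.Dict.ofList
    (((PySem.Dict.ofList pagetype).items).map
      (fun nz => (nz.1, ((pvStream hugepage_order nz.2).map
        (fun mc => pvPool hugepage_order mc.2)).sum)))).items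

-- ===== PRECONDITION & SPEC =====
-- Pre_ excludes exactly the inputs on which the Python A raises IndexError (B raises there too):
-- some movable-typed counts list, seen through the dicts, with hugepage_order < -len(counts),
-- so the order loop reaches an index below -len(counts).
def Pre_hugepage_availability_safe (pagetype : List (Int × List (String × List (String × List Int)))) (hugepage_order : Int) : Prop :=
  ∀ nz ∈ (PySem.Dict.ofList pagetype).items, ∀ zp ∈ (PySem.Dict.ofList nz.2).items,
    ∀ mc ∈ (PySem.Dict.ofList zp.2).items,
      (mc.1 = "Movable" ∨ mc.1 = "Reclaimable" ∨ mc.1 = "CMA") → -(mc.2.length : Int) ≤ hugepage_order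
instance (pagetype : List (Int × List (String × List (String × List Int)))) (hugepage_order : Int) : Decidable (Pre_hugepage_availability_safe pagetype hugepage_order) := by unfold Pre_hugepage_availability_safe; infer_instance

def pvWitness_hugepage_availability_safe : (List (Int × List (String × List (String × List Int)))) × Int :=
  ([(0, [("DMA", [("Movable", [1, 2, 3]), ("Unmovable", [7])])])], 1)

def Spec_hugepage_availability_safe (pagetype : List (Int × List (String × List (String × List Int)))) (hugepage_order : Int) (out : List (Int × Int)) : Prop := out = hugepage_availability_safe_alt pagetype hugepage_order
instance (pagetype : List (Int × List (String × List (String × List Int)))) (hugepage_order : Int) (out : List (Int × Int)) : Decidable (Spec_hugepage_availability_safe pagetype hugepage_order out) := by unfold Spec_hugepage_availability_safe; infer_instance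

-- ===== CLAIM (what is proved, stated in full; the proofs are below) =====
def Claim_equal_hugepage_availability_safe : Prop := ∀ (pagetype : List (Int × List (String × List (String × List Int)))) (hugepage_order : Int), Dom_hugepage_availability_safe pagetype hugepage_order → Pre_hugepage_availability_safe pagetype hugepage_order → Spec_hugepage_availability_safe pagetype hugepage_order (hugepage_availability_safe pagetype hugepage_order)

-- ===== LEMMAS AND PROOFS =====

-- The descending Horner fold with accumulator a equals a * 2^n plus the same fold from 0.
theorem pvHornerAcc (g : Int → Int) : ∀ (n : Nat) (h a : Int),
    (PySem.List.pyRange (h + n - 1) (h - 1) (-1)).foldl (fun acc o => acc * 2 + g o) a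
      = a * 2 ^ n + (PySem.List.pyRange (h + n - 1) (h - 1) (-1)).foldl (fun acc o => acc * 2 + g o) 0 := by
  intro n
  induction n with
  | zero =>
    intro h a
    rw [PySem.List.pyRange_neg_one_eq_nil (by omega)]
    simp
  | succ n ih =>
    intro h a
    have hcons : PySem.List.pyRange (h + (n + 1 : Nat) - 1) (h - 1) (-1)
        = (h + n) :: PySem.List.pyRange (h + n - 1) (h - 1) (-1) := by
      have he : (h + ((n + 1 : Nat) : Int) - 1) = h + n := by push_cast; ring
      rw [he, PySem.List.pyRange_neg_one_cons (by omega)]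
    rw [hcons]
    simp only [List.foldl_cons]
    rw [ih h (a * 2 + g (h + n)), ih h (0 * 2 + g (h + n))]
    ring

-- A's ascending shift-weighted fold equals adding the Horner accumulator to the initial total.
theorem pvKey (g : Int → Int) : ∀ (n : Nat) (h t : Int),
    (PySem.List.pyRange h (h + n) 1).foldl (fun t o => t + g o * (2 : Int) ^ (o - h).toNat) t
      = t + (PySem.List.pyRange (h + n - 1) (h - 1) (-1)).foldl (fun acc o => acc * 2 + g o) 0 := by
  intro n
  induction n with
  | zero =>
    intro h t
    rw [PySem.List.pyRange_one_eq_nil (by omega), PySem.List.pyRange_neg_one_eq_nil (by omega)]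
    simp
  | succ n ih =>
    intro h t
    have hsplit : PySem.List.pyRange h (h + ((n + 1 : Nat) : Int)) 1
        = PySem.List.pyRange h (h + n) 1 ++ [h + n] := by
      have he : (h + ((n + 1 : Nat) : Int)) = (h + n) + 1 := by push_cast; ring
      rw [he, PySem.List.pyRange_one_succ_right (by omega)]
    have hcons : PySem.List.pyRange (h + ((n + 1 : Nat) : Int) - 1) (h - 1) (-1)
        = (h + n) :: PySem.List.pyRange (h + n - 1) (h - 1) (-1) := by
      have he : (h + ((n + 1 : Nat) : Int) - 1) = h + n := by push_cast; ring
      rw [he, PySem.List.pyRange_neg_one_cons (by omega)]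
    rw [hsplit, hcons, List.foldl_append]
    simp only [List.foldl_cons, List.foldl_nil]
    rw [ih h t, pvHornerAcc g n h (0 * 2 + g (h + n))]
    have he : (h + (n : Int) - h).toNat = n := by omega
    rw [he]
    ring

-- A's per-pair loop body, written as 'add the (filtered) pool value'.
theorem pvBody_eq (hugepage_order : Int) (total : Int) (mc : String × List Int) :
    pvA_mtype hugepage_order total mc
      = total + (if PySem.Set.contains MOVABLE_MTYPES mc.1 && decide (hugepage_order < (mc.2.length : Int))
                 then pvPool hugepage_order mc.2 else 0) := by
  unfold pvA_mtype pvPool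
  by_cases hc : PySem.Set.contains MOVABLE_MTYPES mc.1 = true ∧ hugepage_order < (mc.2.length : Int)
  · rw [if_neg (fun hor => hor.elim (fun hnp => hnp hc.1) (fun hle => absurd hc.2 (not_lt.mpr hle))),
      if_pos (by simp only [Bool.and_eq_true, decide_eq_true_eq]; exact ⟨hc.1, hc.2⟩)]
    have hn : (mc.2.length : Int) = hugepage_order + (((mc.2.length : Int) - hugepage_order).toNat : Int) := by
      omega
    calc (PySem.List.pyRange hugepage_order (mc.2.length : Int) 1).foldl
          (fun total order =>
            total + PySem.List.pyGetD mc.2 order 0 * ((1 : Int) <<< (order - hugepage_order).toNat))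
          total
        = (PySem.List.pyRange hugepage_order (mc.2.length : Int) 1).foldl
          (fun total order =>
            total + PySem.List.pyGetD mc.2 order 0 * (2 : Int) ^ (order - hugepage_order).toNat)
          total := by
          simp only [Int.shiftLeft_eq, one_mul]
      _ = total + (PySem.List.pyRange ((mc.2.length : Int) - 1) (hugepage_order - 1) (-1)).foldl
          (fun acc order => acc * 2 + PySem.List.pyGetD mc.2 order 0) 0 := by
          rw [hn]
          exact pvKey (fun o => PySem.List.pyGetD mc.2 o 0)
            ((mc.2.length : Int) - hugepage_order).toNat hugepage_order total
  · rw [if_pos, if_neg (by simpa [Decidable.not_and_iff_or_not, not_lt] using hc), add_zero]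
    rcases Decidable.not_and_iff_or_not.mp hc with h1 | h2
    · exact Or.inl h1
    · exact Or.inr (by omega)

-- summing a filtered-then-mapped stream is summing the 0-padded map
theorem pvSumFilter {α : Type} (p : α → Bool) (f : α → Int) (l : List α) :
    ((l.filter p).map f).sum = (l.map (fun x => if p x then f x else 0)).sum := by
  induction l with
  | nil => rfl
  | cons x xs ih =>
    by_cases hx : p x = true <;> simp [hx, ih]

-- the two per-node totals agree
theorem pvNode_eq (hugepage_order : Int) (zones : List (String × List (String × List Int))) :
    ((PySem.Dict.ofList zones).values).foldl (pvA_zone hugepage_order) 0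
      = ((pvStream hugepage_order zones).map (fun mc => pvPool hugepage_order mc.2)).sum := by
  unfold pvA_zone pvStream
  rw [← List.foldl_flatMap]
  have : ∀ (L : List (String × List Int)) (t : Int),
      L.foldl (pvA_mtype hugepage_order) t
        = t + (L.map (fun mc =>
            if PySem.Set.contains MOVABLE_MTYPES mc.1 && decide (hugepage_order < (mc.2.length : Int))
            then pvPool hugepage_order mc.2 else 0)).sum := by
    intro L
    induction L with
    | nil => intro t; simp
    | cons x xs ih =>
      intro t
      simp only [List.foldl_cons, List.map_cons, List.sum_cons, pvBody_eq, ih]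
      ring
  rw [this, pvSumFilter, zero_add]

-- ===== VERDICT (by name: the statement is the Claim_ definition above) =====
theorem hugepage_availability_safe_spec : Claim_equal_hugepage_availability_safe := by
  intro pagetype hugepage_order _ _
  unfold Spec_hugepage_availability_safe hugepage_availability_safe hugepage_availability_safe_alt
  have hnodup : (((PySem.Dict.ofList pagetype).items).map Prod.fst).Nodup :=
    PySem.Dict.nodup_keys_ofList pagetype
  -- A side: fold of inserts over fresh distinct keys appends
  rw [show pvA_node hugepage_order
        = fun r nz => PySem.Dict.insert r nz.1
            (((PySem.Dict.ofList nz.2).values).foldl (pvA_zone hugepage_order) 0) from rfl]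
  rw [PySem.Dict.items_foldl_insert_fresh _ _ _ _ (by intro a _; exact PySem.Dict.contains_empty (ν := Int) a.1) hnodup]
  -- B side: dict comprehension = fold of inserts over the mapped pair list
  rw [show PySem.Dict.ofList
        (((PySem.Dict.ofList pagetype).items).map
          (fun nz => (nz.1, ((pvStream hugepage_order nz.2).map
            (fun mc => pvPool hugepage_order mc.2)).sum)))
      = (((PySem.Dict.ofList pagetype).items).map
          (fun nz => (nz.1, ((pvStream hugepage_order nz.2).map
            (fun mc => pvPool hugepage_order mc.2)).sum))).foldl
          (fun d p => PySem.Dict.insert d p.1 p.2) PySem.Dict.empty from rfl]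
  rw [PySem.Dict.items_foldl_insert_fresh (k := Prod.fst) (v := Prod.snd) _ _
        (by intro a _; exact PySem.Dict.contains_empty (ν := Int) a.1)
        (by simpa [List.map_map, Function.comp] using hnodup)]
  simp [List.map_map, Function.comp, pvNode_eq]
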